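-- pv_equiv track=rewrite | github.com/Kingsley1116/Explore-the-Mystery-of-Lotus-Island | G_籌碼兌換 - 2/generate_chip_exchange_2_data.py | calculate_min_chips_with_limits
-- ===== SOURCE A (Python) =====
-- def calculate_min_chips_with_limits(M, limits):
--     """
--     计算带数量限制的最少筹码数量
--     M: 需要凑出的金额
--     limits: [c1, c2, c3, c4, c5] 分别对应10元、50元、100元、500元、1000元的数量上限
--     返回最少筹码数，无法凑出则返回-1
--     """
--     # 所有面额都是10的倍数，若M不是10的倍数则无法凑出
--     if M % 10 != 0:
--         return -1
--
--     # 简化问题：将金额和面额都除以10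
--     target = M // 10
--     denominations = [1, 5, 10, 50, 100]  # 对应10元、50元、100元、500元、1000元 (除以10后)
--
--     # 动态规划数组，dp[i]表示凑出i所需的最少筹码数
--     max_val = target
--     dp = [float('inf')] * (max_val + 1)
--     dp[0] = 0  # 凑出0元需要0个筹码
--
--     # 对每种面额进行处理
--     for i in range(5):
--         d = denominations[i]
--         count_limit = limits[i]
--
--         # 处理当前面额，使用0到count_limit个
--         # 采用逆向遍历避免重复使用同一筹码多次
--         for j in range(max_val, d - 1, -1):
--             # 尝试使用k个当前面额的筹码
--             for k in range(1, min(count_limit, j // d) + 1):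
--                 if dp[j - k * d] + k < dp[j]:
--                     dp[j] = dp[j - k * d] + k
--
--     return dp[target] if dp[target] != float('inf') else -1
-- ===== SOURCE B (Python) =====
-- def calculate_min_chips_with_limits(M, limits):
--     """Bounded-knapsack min #chips for M, with per-denomination count limits.
--
--     Each denomination's usable count is split by repeated halving into
--     O(log limit) 'bundles', each relaxed with a single 0/1 reverse pass,
--     instead of an inner loop over every usable count k.
--     """
--     if M % 10 != 0:
--         return -1
--     target = M // 10
--     denominations = [1, 5, 10, 50, 100]
--     INF = float('inf')
--     dp = [INF] * (target + 1)
--     dp[0] = 0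
--     for d, limit in zip(denominations, limits):
--         rem = min(limit, target // d)  # more than target // d coins of size d never fit
--         while rem > 0:
--             part = (rem + 1) // 2
--             rem -= part
--             w = part * d
--             for j in range(target, w - 1, -1):
--                 if dp[j - w] + part < dp[j]:
--                     dp[j] = dp[j - w] + part
--     return dp[target] if dp[target] != INF else -1
-- ===== Notes on version B (the rewrite author's own statement) =====
-- stated objective: alternative
-- what changed: A relaxes every usable count k of each denomination with an inner per-count loop (classic bounded knapsack); B instead splits each denomination's usable count by repeated halving into O(log limit) bundles and relaxes each bundle with a single 0/1 reverse pass, so the inner per-count loop disappears (fewer relaxations when limits are large, same measured cost on the timing family).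
import Mathlib
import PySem

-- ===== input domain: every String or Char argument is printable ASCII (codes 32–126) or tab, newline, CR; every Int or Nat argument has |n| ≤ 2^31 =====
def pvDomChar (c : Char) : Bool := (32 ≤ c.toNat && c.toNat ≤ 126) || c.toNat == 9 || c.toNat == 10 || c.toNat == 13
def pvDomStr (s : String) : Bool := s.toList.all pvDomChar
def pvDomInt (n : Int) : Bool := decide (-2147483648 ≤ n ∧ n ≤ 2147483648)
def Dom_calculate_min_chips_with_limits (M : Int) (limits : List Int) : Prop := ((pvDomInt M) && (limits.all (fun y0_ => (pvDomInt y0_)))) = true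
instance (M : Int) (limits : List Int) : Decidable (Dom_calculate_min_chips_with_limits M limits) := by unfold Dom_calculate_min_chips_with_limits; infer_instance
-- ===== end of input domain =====

-- B replaces A's inner loop over every usable coin count by halving 'bundles',
-- each relaxed with a single 0/1 reverse pass (objective: alternative algorithm).
-- dp cells are Option Int: `none` models Python's float('inf').

-- dp[x] < dp[y] with none = float('inf')
def pvOlt : Option Int → Option Int → Bool
  | none, _ => false
  | some _, none => true
  | some a, some b => decide (a < b)

-- dp[x] + k with none = float('inf')
def pvOadd (o : Option Int) (k : Int) : Option Int := o.map (· + k)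

-- ===== PORT A =====
def pvDenomsA : List Int := [1, 5, 10, 50, 100]

-- inner 'for k in range(1, min(count_limit, j // d) + 1)' loop of A
def pvBodyA (c d j : Int) (dp : List (Option Int)) : List (Option Int) :=
  (PySem.List.pyRange 1 (min c (PySem.Int.floordiv j d) + 1) 1).foldl (fun dp k =>
    if pvOlt (pvOadd (PySem.List.pyGetD dp (j - k * d) none) k) (PySem.List.pyGetD dp j none) then
      PySem.List.pySetD dp j (pvOadd (PySem.List.pyGetD dp (j - k * d) none) k)
    else dp) dp

-- 'for j in range(max_val, d - 1, -1)' loop of A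
def pvPassA (n c d : Int) (dp : List (Option Int)) : List (Option Int) :=
  (PySem.List.pyRange n (d - 1) (-1)).foldl (fun dp j => pvBodyA c d j dp) dp

def calculate_min_chips_with_limits (M : Int) (limits : List Int) : Int :=
  if PySem.Int.mod M 10 ≠ 0 then -1
  else
    -- Python raises here when target < 0 (dp[0] on an empty list) or len(limits) < 5
    -- (limits[i]); .toNat / the getD default only make the port total outside Pre_.
    let target := PySem.Int.floordiv M 10
    let dp0 := (List.replicate (target.toNat + 1) (none : Option Int)).set 0 (some 0)
    let dp := (PySem.List.pyRange 0 5 1).foldl (fun dp i =>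
      pvPassA target (PySem.List.pyGetD limits i 0) (PySem.List.pyGetD pvDenomsA i 0) dp) dp0
    match PySem.List.pyGetD dp target none with
    | some v => v
    | none => -1

-- ===== PORT B =====
-- one 0/1 reverse relaxation pass with a bundle of `p` coins (weight w = p*d)
def pvPassB (n w p : Int) (dp : List (Option Int)) : List (Option Int) :=
  (PySem.List.pyRange n (w - 1) (-1)).foldl (fun dp j =>
    if pvOlt (pvOadd (PySem.List.pyGetD dp (j - w) none) p) (PySem.List.pyGetD dp j none) then
      PySem.List.pySetD dp j (pvOadd (PySem.List.pyGetD dp (j - w) none) p)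
    else dp) dp

-- 'while rem > 0' halving loop of B
def pvSplitB (n d rem : Int) (dp : List (Option Int)) : List (Option Int) :=
  if 0 < rem then
    let part := PySem.Int.floordiv (rem + 1) 2
    pvSplitB n d (rem - part) (pvPassB n (part * d) part dp)
  else dp
termination_by rem.toNat
decreasing_by
  rw [PySem.Int.floordiv_eq_ediv_of_pos (by omega : (0:Int) < 2)]
  omega

def calculate_min_chips_with_limits_alt (M : Int) (limits : List Int) : Int :=
  if PySem.Int.mod M 10 ≠ 0 then -1
  else
    let target := PySem.Int.floordiv M 10
    let dp0 := (List.replicate (target.toNat + 1) (none : Option Int)).set 0 (some 0)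
    let dp := (([(1:Int), 5, 10, 50, 100]).zip limits).foldl (fun dp dl =>
      pvSplitB target dl.1 (min dl.2 (PySem.Int.floordiv target dl.1)) dp) dp0
    match PySem.List.pyGetD dp target none with
    | some v => v
    | none => -1

-- ===== PRECONDITION & SPEC =====
-- Pre_ excludes exactly the inputs on which the Python A raises IndexError:
-- M a negative multiple of 10 (dp has length ≤ 0, dp[0] fails) or fewer than 5
-- limits (limits[i] fails) while M is a multiple of 10.
def Pre_calculate_min_chips_with_limits (M : Int) (limits : List Int) : Prop :=
  M % 10 ≠ 0 ∨ (0 ≤ M ∧ 5 ≤ limits.length)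
instance (M : Int) (limits : List Int) : Decidable (Pre_calculate_min_chips_with_limits M limits) := by
  unfold Pre_calculate_min_chips_with_limits; infer_instance

def pvWitness_calculate_min_chips_with_limits : Int × List Int := (60, [3, 1, 0, 0, 0])

def Spec_calculate_min_chips_with_limits (M : Int) (limits : List Int) (out : Int) : Prop := out = calculate_min_chips_with_limits_alt M limits
instance (M : Int) (limits : List Int) (out : Int) : Decidable (Spec_calculate_min_chips_with_limits M limits out) := by unfold Spec_calculate_min_chips_with_limits; infer_instance

-- ===== CLAIM (what is proved, stated in full; the proofs are below) =====
def Claim_equal_calculate_min_chips_with_limits : Prop := ∀ (M : Int) (limits : List Int), Dom_calculate_min_chips_with_limits M limits → Pre_calculate_min_chips_with_limits M limits → Spec_calculate_min_chips_with_limits M limits (calculate_min_chips_with_limits M limits)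

-- ===== LEMMAS AND PROOFS =====

-- reading dp at an Int index; none both for 'inf' cells and out of range (only min-relevant reads)
def pvGet (dp : List (Option Int)) (j : Int) : Option Int :=
  if 0 ≤ j then dp.getD j.toNat none else none

def pvOmin (a b : Option Int) : Option Int := if pvOlt b a then b else a

def pvRunMin (init : Option Int) (ks : List Int) (f : Int → Option Int) : Option Int :=
  ks.foldl (fun a k => pvOmin a (f k)) init

def pvOle (a b : Option Int) : Prop := pvOlt b a = false

-- halving decomposition of a coin count, and subset sums of a part list
def pvParts (rem : Int) : List Int :=
  if 0 < rem then
    let part := PySem.Int.floordiv (rem + 1) 2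
    part :: pvParts (rem - part)
  else []
termination_by rem.toNat
decreasing_by
  rw [PySem.Int.floordiv_eq_ediv_of_pos (by omega : (0:Int) < 2)]
  omega

def pvSums : List Int → List Int
  | [] => [0]
  | q :: ps => pvSums ps ++ (pvSums ps).map (· + q)

-- per-cell meaning of one denomination pass of A
def pvPhi (n c d : Int) (g : Int → Option Int) (j : Int) : Option Int :=
  if 0 ≤ j ∧ j ≤ n then
    pvRunMin (g j) (PySem.List.pyRange 1 (min c (PySem.Int.floordiv j d) + 1) 1)
      (fun k => pvOadd (g (j - k * d)) k)
  else g j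

-- per-cell meaning of one 0/1 bundle pass of B
def pvPsi (n w p : Int) (g : Int → Option Int) (j : Int) : Option Int :=
  if 0 ≤ j ∧ j ≤ n then pvOmin (g j) (pvOadd (g (j - w)) p) else g j

def pvTheta (n d : Int) (ps : List Int) (g : Int → Option Int) : Int → Option Int :=
  ps.foldl (fun g part => pvPsi n (part * d) part g) g

-- ---- Option-Int order / min algebra ----

theorem pvOmin_none_left (b : Option Int) : pvOmin none b = b := by
  cases b <;> simp [pvOmin, pvOlt]

theorem pvOmin_none_right (a : Option Int) : pvOmin a none = a := by
  cases a <;> simp [pvOmin, pvOlt]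

theorem pvOadd_zero (o : Option Int) : pvOadd o 0 = o := by
  cases o <;> simp [pvOadd]

theorem pvOadd_none (k : Int) : pvOadd none k = none := rfl

theorem pvOadd_add (o : Option Int) (a b : Int) : pvOadd (pvOadd o a) b = pvOadd o (a + b) := by
  cases o <;> simp [pvOadd] <;> ring

theorem pvOadd_omin (a b : Option Int) (s : Int) :
    pvOadd (pvOmin a b) s = pvOmin (pvOadd a s) (pvOadd b s) := by
  cases a <;> cases b <;> simp [pvOmin, pvOlt, pvOadd] <;> split_ifs <;> simp_all <;> omega

theorem pvOle_refl (a : Option Int) : pvOle a a := by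
  cases a <;> simp [pvOle, pvOlt]

theorem pvOle_none (a : Option Int) : pvOle a none := rfl

theorem pvOle_trans {a b c : Option Int} (h1 : pvOle a b) (h2 : pvOle b c) : pvOle a c := by
  cases a <;> cases b <;> cases c <;> simp_all [pvOle, pvOlt] <;> omega

theorem pvOle_antisymm {a b : Option Int} (h1 : pvOle a b) (h2 : pvOle b a) : a = b := by
  cases a <;> cases b <;> simp_all [pvOle, pvOlt] <;> omega

theorem pvOmin_le_left (a b : Option Int) : pvOle (pvOmin a b) a := by
  cases a <;> cases b <;> simp [pvOmin, pvOle, pvOlt] <;> split_ifs <;> simp_all <;> omega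

theorem pvOmin_le_right (a b : Option Int) : pvOle (pvOmin a b) b := by
  cases a <;> cases b <;> simp [pvOmin, pvOle, pvOlt] <;> split_ifs <;> simp_all <;> omega

theorem pvOle_omin {c a b : Option Int} (h1 : pvOle c a) (h2 : pvOle c b) :
    pvOle c (pvOmin a b) := by
  unfold pvOmin; split_ifs <;> assumption

-- ---- pvRunMin theory ----

theorem pvRunMin_nil (i : Option Int) (f : Int → Option Int) : pvRunMin i [] f = i := rfl

theorem pvRunMin_cons (i : Option Int) (k : Int) (ks : List Int) (f : Int → Option Int) :
    pvRunMin i (k :: ks) f = pvRunMin (pvOmin i (f k)) ks f := rfl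

theorem pvRunMin_le_init (i : Option Int) (ks : List Int) (f : Int → Option Int) :
    pvOle (pvRunMin i ks f) i := by
  induction ks generalizing i with
  | nil => exact pvOle_refl i
  | cons k ks ih =>
    rw [pvRunMin_cons]
    exact pvOle_trans (ih (pvOmin i (f k))) (pvOmin_le_left _ _)

theorem pvRunMin_le_mem {x : Int} {ks : List Int} (i : Option Int) (f : Int → Option Int)
    (hx : x ∈ ks) : pvOle (pvRunMin i ks f) (f x) := by
  induction ks generalizing i with
  | nil => cases hx
  | cons k ks ih =>
    rw [pvRunMin_cons]
    rcases List.mem_cons.1 hx with rfl | hx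
    · exact pvOle_trans (pvRunMin_le_init _ _ _) (pvOmin_le_right _ _)
    · exact ih _ hx

theorem pvLe_runMin {b i : Option Int} {ks : List Int} {f : Int → Option Int}
    (hi : pvOle b i) (hmem : ∀ x ∈ ks, pvOle b (f x)) : pvOle b (pvRunMin i ks f) := by
  induction ks generalizing i with
  | nil => exact hi
  | cons k ks ih =>
    rw [pvRunMin_cons]
    exact ih (pvOle_omin hi (hmem k (List.mem_cons_self))) (fun x hx => hmem x (List.mem_cons_of_mem _ hx))

theorem pvRunMin_eq_of {S T : List Int} {f : Int → Option Int}
    (hST : ∀ x ∈ S, x ∈ T) (hTS : ∀ x ∈ T, x ∈ S ∨ f x = none) :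
    pvRunMin none S f = pvRunMin none T f := by
  apply pvOle_antisymm
  · exact pvLe_runMin (pvOle_none _) (fun x hx => by
      rcases hTS x hx with h | h
      · exact pvRunMin_le_mem _ _ h
      · rw [h]; exact pvOle_none _)
  · exact pvLe_runMin (pvOle_none _) (fun x hx => pvRunMin_le_mem _ _ (hST x hx))

theorem pvRunMin_congr {i : Option Int} {ks : List Int} {f g : Int → Option Int}
    (h : ∀ x ∈ ks, f x = g x) : pvRunMin i ks f = pvRunMin i ks g := by
  induction ks generalizing i with
  | nil => rfl
  | cons k ks ih =>
    rw [pvRunMin_cons, pvRunMin_cons, h k List.mem_cons_self]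
    exact ih (fun x hx => h x (List.mem_cons_of_mem _ hx))

theorem pvRunMin_init (i : Option Int) (ks : List Int) (f : Int → Option Int) :
    pvRunMin i ks f = pvOmin i (pvRunMin none ks f) := by
  apply pvOle_antisymm
  · exact pvOle_omin (pvRunMin_le_init _ _ _)
      (pvLe_runMin (pvOle_none _) (fun x hx => pvRunMin_le_mem _ _ hx))
  · exact pvLe_runMin (pvOmin_le_left _ _)
      (fun x hx => pvOle_trans (pvOmin_le_right _ _) (pvRunMin_le_mem _ _ hx))

theorem pvRunMin_append (xs ys : List Int) (f : Int → Option Int) :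
    pvRunMin none (xs ++ ys) f = pvOmin (pvRunMin none xs f) (pvRunMin none ys f) := by
  unfold pvRunMin
  rw [List.foldl_append]
  exact pvRunMin_init _ _ _

theorem pvRunMin_map (ks : List Int) (h : Int → Int) (f : Int → Option Int) :
    pvRunMin none (ks.map h) f = pvRunMin none ks (fun k => f (h k)) := by
  unfold pvRunMin
  rw [List.foldl_map]

theorem pvRunMin_distrib (ks : List Int) (f g : Int → Option Int) :
    pvRunMin none ks (fun k => pvOmin (f k) (g k)) =
      pvOmin (pvRunMin none ks f) (pvRunMin none ks g) := by
  apply pvOle_antisymm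
  · apply pvOle_omin
    · exact pvLe_runMin (pvOle_none _)
        (fun x hx => pvOle_trans (pvRunMin_le_mem _ _ hx) (pvOmin_le_left _ _))
    · exact pvLe_runMin (pvOle_none _)
        (fun x hx => pvOle_trans (pvRunMin_le_mem _ _ hx) (pvOmin_le_right _ _))
  · apply pvLe_runMin (pvOle_none _)
    intro x hx
    exact pvOle_omin
      (pvOle_trans (pvOmin_le_left _ _) (pvRunMin_le_mem _ _ hx))
      (pvOle_trans (pvOmin_le_right _ _) (pvRunMin_le_mem _ _ hx))

-- ---- pvGet / set lemmas ----

theorem pvGet_neg {dp : List (Option Int)} {j : Int} (h : j < 0) : pvGet dp j = none := by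
  simp [pvGet]; omega

theorem pvGet_set (dp : List (Option Int)) (j : Int) (v : Option Int)
    (h0 : 0 ≤ j) (hlt : j.toNat < dp.length) (i : Int) :
    pvGet (dp.set j.toNat v) i = if i = j then v else pvGet dp i := by
  unfold pvGet
  by_cases hi : 0 ≤ i
  · simp only [hi, if_pos]
    by_cases hij : i = j
    · subst hij
      simp [List.getD_eq_getElem?_getD, List.getElem?_set, hlt]
    · have : i.toNat ≠ j.toNat := by omega
      simp [List.getD_eq_getElem?_getD, List.getElem?_set, Ne.symm this, hij]
  · have hij : i ≠ j := by omega
    simp [hi, hij]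

theorem pvSet_self (dp : List (Option Int)) (j : Int)
    (h0 : 0 ≤ j) (hlt : j.toNat < dp.length) :
    dp.set j.toNat (pvGet dp j) = dp := by
  have : pvGet dp j = dp[j.toNat] := by
    simp [pvGet, h0, List.getD_eq_getElem?_getD, List.getElem?_eq_getElem hlt]
  rw [this, List.set_getElem_self]

-- ---- generic descending in-place relaxation loop ----

theorem pvDescLoop (body : List (Option Int) → Int → List (Option Int))
    (U : (Int → Option Int) → Int → Option Int) (L : Int) (hL : 1 ≤ L)
    (hbody : ∀ dp (j : Int), L ≤ j → j < (dp.length : Int) →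
      body dp j = dp.set j.toNat (U (pvGet dp) j))
    (hcong : ∀ g g' (j : Int), (∀ i : Int, i ≤ j → g i = g' i) → U g j = U g' j) :
    ∀ (m : Nat) (a : Int), (a - (L - 1)).toNat = m → ∀ dp : List (Option Int), a < (dp.length : Int) →
      ((PySem.List.pyRange a (L - 1) (-1)).foldl body dp).length = dp.length ∧
      ∀ i : Int, pvGet ((PySem.List.pyRange a (L - 1) (-1)).foldl body dp) i =
        if L ≤ i ∧ i ≤ a then U (pvGet dp) i else pvGet dp i := by
  intro m
  induction m with
  | zero =>
    intro a ha dp _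
    have hnil : PySem.List.pyRange a (L - 1) (-1) = [] :=
      PySem.List.pyRange_neg_one_eq_nil (by omega)
    rw [hnil]
    refine ⟨rfl, fun i => ?_⟩
    have : ¬ (L ≤ i ∧ i ≤ a) := by omega
    simp [this]
  | succ m ih =>
    intro a ha dp hlen
    have hLa : L - 1 < a := by omega
    have h0a : 0 ≤ a := by omega
    have hcons : PySem.List.pyRange a (L - 1) (-1) = a :: PySem.List.pyRange (a - 1) (L - 1) (-1) :=
      PySem.List.pyRange_neg_one_cons hLa
    rw [hcons, List.foldl_cons]
    have hbd := hbody dp a (by omega) hlen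
    have hanat : a.toNat < dp.length := by omega
    set dp1 := body dp a with hdp1
    have hdp1eq : dp1 = dp.set a.toNat (U (pvGet dp) a) := hbd
    have hlen1 : dp1.length = dp.length := by rw [hdp1eq]; simp
    have hget1 : ∀ i : Int, pvGet dp1 i = if i = a then U (pvGet dp) a else pvGet dp i := by
      intro i; rw [hdp1eq]; exact pvGet_set dp a _ h0a hanat i
    have hrec := ih (a - 1) (by omega) dp1 (by omega)
    refine ⟨by rw [hrec.1, hlen1], fun i => ?_⟩
    rw [hrec.2 i]
    by_cases hcase : L ≤ i ∧ i ≤ a - 1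
    · simp only [hcase, if_pos]
      have : L ≤ i ∧ i ≤ a := by omega
      simp only [this, if_pos]
      apply hcong
      intro i' hi'
      rw [hget1 i']
      have : i' ≠ a := by omega
      simp [this]
    · simp only [hcase, if_neg, not_false_iff]
      rw [hget1 i]
      by_cases hia : i = a
      · subst hia
        have : L ≤ i ∧ i ≤ i := by omega
        simp [this]
      · have : ¬ (L ≤ i ∧ i ≤ a) := by omega
        simp [hia, this]

-- ---- the inner k-loop of A as one set ----

theorem pvInner (d j : Int) (hd : 1 ≤ d) :
    ∀ (ks : List Int) (dp : List (Option Int)), (∀ k ∈ ks, 1 ≤ k ∧ k * d ≤ j) →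
      0 ≤ j → j < (dp.length : Int) →
      ks.foldl (fun dp k =>
        if pvOlt (pvOadd (PySem.List.pyGetD dp (j - k * d) none) k) (PySem.List.pyGetD dp j none) then
          PySem.List.pySetD dp j (pvOadd (PySem.List.pyGetD dp (j - k * d) none) k)
        else dp) dp
      = dp.set j.toNat (pvRunMin (pvGet dp j) ks (fun k => pvOadd (pvGet dp (j - k * d)) k)) := by
  intro ks
  induction ks with
  | nil =>
    intro dp _ h0 hlt
    rw [List.foldl_nil, pvRunMin_nil]
    exact (pvSet_self dp j h0 (by omega)).symm
  | cons k ks ih =>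
    intro dp hks h0 hlt
    have hk := hks k List.mem_cons_self
    have hsub : 0 ≤ j - k * d := by omega
    have hjnat : j.toNat < dp.length := by omega
    have hget1 : PySem.List.pyGetD dp (j - k * d) none = pvGet dp (j - k * d) := by
      rw [PySem.List.pyGetD_of_nonneg dp none hsub, pvGet, if_pos hsub]
    have hget2 : PySem.List.pyGetD dp j none = pvGet dp j := by
      rw [PySem.List.pyGetD_of_nonneg dp none h0, pvGet, if_pos h0]
    have hset : ∀ v : Option Int, PySem.List.pySetD dp j v = dp.set j.toNat v := fun v =>
      PySem.List.pySetD_of_nonneg dp v h0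
    rw [List.foldl_cons]
    have hstep : (if pvOlt (pvOadd (PySem.List.pyGetD dp (j - k * d) none) k) (PySem.List.pyGetD dp j none) then
          PySem.List.pySetD dp j (pvOadd (PySem.List.pyGetD dp (j - k * d) none) k)
        else dp)
        = dp.set j.toNat (pvOmin (pvGet dp j) (pvOadd (pvGet dp (j - k * d)) k)) := by
      rw [hget1, hget2, hset, pvOmin]
      split_ifs with h
      · rfl
      · exact (pvSet_self dp j h0 hjnat).symm
    rw [hstep]
    set v := pvOmin (pvGet dp j) (pvOadd (pvGet dp (j - k * d)) k) with hv
    set dp1 := dp.set j.toNat v with hdp1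
    have hlen1 : dp1.length = dp.length := by simp [hdp1]
    have hget3 : ∀ i : Int, pvGet dp1 i = if i = j then v else pvGet dp i :=
      fun i => pvGet_set dp j v h0 hjnat i
    rw [ih dp1 (fun x hx => hks x (List.mem_cons_of_mem _ hx)) h0 (by omega)]
    have hgj : pvGet dp1 j = v := by rw [hget3]; simp
    have hcongr : pvRunMin (pvGet dp1 j) ks (fun k' => pvOadd (pvGet dp1 (j - k' * d)) k')
        = pvRunMin v ks (fun k' => pvOadd (pvGet dp (j - k' * d)) k') := by
      rw [hgj]
      apply pvRunMin_congr
      intro x hx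
      have hxk := hks x (List.mem_cons_of_mem _ hx)
      have hxd : 1 ≤ x * d := le_trans hxk.1 (le_mul_of_one_le_right (by omega) hd)
      have : j - x * d ≠ j := by omega
      rw [hget3, if_neg this]
    rw [hcongr, hdp1, List.set_set]
    rw [pvRunMin_cons]

-- ---- pass A pointwise ----

theorem pvPassA_get (n c d : Int) (hd : 1 ≤ d) (hn : 0 ≤ n)
    (dp : List (Option Int)) (hlen : dp.length = n.toNat + 1) :
    (pvPassA n c d dp).length = dp.length ∧
    ∀ i : Int, pvGet (pvPassA n c d dp) i = pvPhi n c d (pvGet dp) i := by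
  have hmain := pvDescLoop (fun dp j => pvBodyA c d j dp)
    (fun g j => pvRunMin (g j) (PySem.List.pyRange 1 (min c (PySem.Int.floordiv j d) + 1) 1)
      (fun k => pvOadd (g (j - k * d)) k)) d hd
    (by
      intro dp j hdj hjlen
      unfold pvBodyA
      apply pvInner d j hd _ dp _ (by omega) hjlen
      intro k hk
      have hmem := (PySem.List.mem_pyRange_one).1 hk
      have hk1 : 1 ≤ k := hmem.1
      have hkK : k ≤ min c (PySem.Int.floordiv j d) := by omega
      have : k ≤ PySem.Int.floordiv j d := le_trans hkK (min_le_right _ _)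
      exact ⟨hk1, (PySem.Int.le_floordiv_iff_mul_le (by omega)).1 this⟩)
    (by
      intro g g' j hgg
      beta_reduce
      rw [hgg j (le_refl j)]
      apply pvRunMin_congr
      intro x hx
      have hmem := (PySem.List.mem_pyRange_one).1 hx
      have hxd : 0 ≤ x * d := mul_nonneg (by omega) (by omega)
      rw [hgg (j - x * d) (by omega)])
    (n - (d - 1)).toNat n rfl dp (by omega)
  refine ⟨hmain.1, fun i => ?_⟩
  rw [show pvPassA n c d dp = (PySem.List.pyRange n (d - 1) (-1)).foldl (fun dp j => pvBodyA c d j dp) dp from rfl]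
  rw [hmain.2 i]
  unfold pvPhi
  by_cases h1 : d ≤ i ∧ i ≤ n
  · have : 0 ≤ i ∧ i ≤ n := by omega
    simp only [h1, this, if_pos]
  · by_cases h2 : 0 ≤ i ∧ i ≤ n
    · -- here 0 ≤ i < d : the k-range is empty on both sides
      have hid : i < d := by omega
      have hfd : PySem.Int.floordiv i d = 0 := by
        rw [PySem.Int.floordiv_eq_ediv_of_pos (by omega : (0:Int) < d)]
        exact Int.ediv_eq_zero_of_lt h2.1 hid
      have hne : min c (PySem.Int.floordiv i d) + 1 ≤ 1 := by
        have := min_le_right c (PySem.Int.floordiv i d)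
        omega
      have hrange : PySem.List.pyRange 1 (min c (PySem.Int.floordiv i d) + 1) 1 = [] :=
        PySem.List.pyRange_one_eq_nil hne
      simp only [h1, if_neg, not_false_iff, h2, if_pos, hrange, pvRunMin_nil]
      simp
    · simp only [h1, h2, if_neg, not_false_iff]

-- ---- pass B pointwise ----

theorem pvPassB_get (n w p : Int) (hw : 1 ≤ w) (hn : 0 ≤ n)
    (dp : List (Option Int)) (hlen : dp.length = n.toNat + 1) :
    (pvPassB n w p dp).length = dp.length ∧
    ∀ i : Int, pvGet (pvPassB n w p dp) i = pvPsi n w p (pvGet dp) i := by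
  have hmain := pvDescLoop (fun dp j =>
      if pvOlt (pvOadd (PySem.List.pyGetD dp (j - w) none) p) (PySem.List.pyGetD dp j none) then
        PySem.List.pySetD dp j (pvOadd (PySem.List.pyGetD dp (j - w) none) p)
      else dp)
    (fun g j => pvOmin (g j) (pvOadd (g (j - w)) p)) w hw
    (by
      intro dp j hwj hjlen
      beta_reduce
      have h0 : 0 ≤ j := by omega
      have hsub : 0 ≤ j - w := by omega
      have hjnat : j.toNat < dp.length := by omega
      rw [PySem.List.pyGetD_of_nonneg dp none hsub, PySem.List.pyGetD_of_nonneg dp none h0,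
        PySem.List.pySetD_of_nonneg dp (pvOadd (dp.getD (j - w).toNat none) p) h0]
      have hget1 : dp.getD (j - w).toNat none = pvGet dp (j - w) := by rw [pvGet, if_pos hsub]
      have hget2 : dp.getD j.toNat none = pvGet dp j := by rw [pvGet, if_pos h0]
      rw [hget1, hget2, pvOmin]
      split_ifs with h
      · rfl
      · exact (pvSet_self dp j h0 hjnat).symm)
    (by
      intro g g' j hgg
      beta_reduce
      rw [hgg j (le_refl j), hgg (j - w) (by omega)])
    (n - (w - 1)).toNat n rfl dp (by omega)
  refine ⟨hmain.1, fun i => ?_⟩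
  rw [show pvPassB n w p dp = (PySem.List.pyRange n (w - 1) (-1)).foldl (fun dp j =>
      if pvOlt (pvOadd (PySem.List.pyGetD dp (j - w) none) p) (PySem.List.pyGetD dp j none) then
        PySem.List.pySetD dp j (pvOadd (PySem.List.pyGetD dp (j - w) none) p)
      else dp) dp from rfl]
  rw [hmain.2 i]
  beta_reduce
  unfold pvPsi
  by_cases h1 : w ≤ i ∧ i ≤ n
  · have h2 : 0 ≤ i ∧ i ≤ n := by omega
    simp [h1, h2]
  · by_cases h2 : 0 ≤ i ∧ i ≤ n
    · have hneg : i - w < 0 := by omega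
      simp [h1, h2, pvGet_neg hneg, pvOadd_none, pvOmin_none_right]
    · simp [h1, h2]

-- ---- the B while-loop as a fold of bundle passes ----

theorem pvParts_eq_pos {rem : Int} (hpos : 0 < rem) :
    pvParts rem = PySem.Int.floordiv (rem + 1) 2 ::
      pvParts (rem - PySem.Int.floordiv (rem + 1) 2) := by
  rw [pvParts, if_pos hpos]

theorem pvSplitB_eq_pos (n d : Int) {rem : Int} (hpos : 0 < rem) (dp : List (Option Int)) :
    pvSplitB n d rem dp = pvSplitB n d (rem - PySem.Int.floordiv (rem + 1) 2)
      (pvPassB n (PySem.Int.floordiv (rem + 1) 2 * d) (PySem.Int.floordiv (rem + 1) 2) dp) := by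
  rw [pvSplitB, if_pos hpos]

theorem pvHalf_bounds {rem : Int} (hpos : 0 < rem) :
    1 ≤ PySem.Int.floordiv (rem + 1) 2 ∧ 2 * PySem.Int.floordiv (rem + 1) 2 ≤ rem + 1 ∧
      rem + 1 ≤ 2 * PySem.Int.floordiv (rem + 1) 2 + 1 := by
  rw [PySem.Int.floordiv_eq_ediv_of_pos (by omega : (0:Int) < 2)]
  omega

theorem pvSplitB_get (n d : Int) (hd : 1 ≤ d) (hn : 0 ≤ n) :
    ∀ (m : Nat) (rem : Int), rem.toNat ≤ m → ∀ dp : List (Option Int), dp.length = n.toNat + 1 →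
      (pvSplitB n d rem dp).length = dp.length ∧
      ∀ i : Int, pvGet (pvSplitB n d rem dp) i = pvTheta n d (pvParts rem) (pvGet dp) i := by
  intro m
  induction m with
  | zero =>
    intro rem hrem dp _
    have hneg : ¬ 0 < rem := by omega
    rw [pvSplitB, if_neg hneg, pvParts, if_neg hneg]
    exact ⟨rfl, fun i => rfl⟩
  | succ m ih =>
    intro rem hrem dp hlen
    by_cases hpos : 0 < rem
    · have hb := pvHalf_bounds hpos
      rw [pvSplitB_eq_pos n d hpos dp, pvParts_eq_pos hpos]
      have hw1 : 1 ≤ PySem.Int.floordiv (rem + 1) 2 * d :=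
        le_trans hb.1 (le_mul_of_one_le_right (by omega) hd)
      have hpass := pvPassB_get n (PySem.Int.floordiv (rem + 1) 2 * d)
        (PySem.Int.floordiv (rem + 1) 2) hw1 hn dp hlen
      have hrec := ih (rem - PySem.Int.floordiv (rem + 1) 2) (by omega)
        (pvPassB n (PySem.Int.floordiv (rem + 1) 2 * d) (PySem.Int.floordiv (rem + 1) 2) dp)
        (by rw [hpass.1, hlen])
      refine ⟨by rw [hrec.1, hpass.1], fun i => ?_⟩
      rw [hrec.2 i]
      have hfun : pvGet (pvPassB n (PySem.Int.floordiv (rem + 1) 2 * d)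
          (PySem.Int.floordiv (rem + 1) 2) dp) =
          pvPsi n (PySem.Int.floordiv (rem + 1) 2 * d) (PySem.Int.floordiv (rem + 1) 2) (pvGet dp) :=
        funext hpass.2
      rw [hfun]
      rfl
    · rw [pvSplitB, if_neg hpos, pvParts, if_neg hpos]
      exact ⟨rfl, fun i => rfl⟩

-- ---- subset sums of the halving decomposition ----

theorem pvParts_pos : ∀ (m : Nat) (rem : Int), rem.toNat ≤ m → ∀ q ∈ pvParts rem, 1 ≤ q := by
  intro m
  induction m with
  | zero =>
    intro rem hrem q hq
    rw [pvParts, if_neg (by omega : ¬ 0 < rem)] at hq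
    cases hq
  | succ m ih =>
    intro rem hrem q hq
    by_cases hpos : 0 < rem
    · have hb := pvHalf_bounds hpos
      rw [pvParts_eq_pos hpos] at hq
      rcases List.mem_cons.1 hq with rfl | hq
      · omega
      · exact ih (rem - PySem.Int.floordiv (rem + 1) 2) (by omega) q hq
    · rw [pvParts, if_neg hpos] at hq
      cases hq

theorem pvSums_nonneg {ps : List Int} (hps : ∀ q ∈ ps, 1 ≤ q) :
    ∀ s ∈ pvSums ps, 0 ≤ s := by
  induction ps with
  | nil =>
    intro s hs
    simp [pvSums] at hs
    omega
  | cons q ps ih =>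
    intro s hs
    have hq := hps q List.mem_cons_self
    have hps' := fun x hx => hps x (List.mem_cons_of_mem _ hx)
    simp only [pvSums, List.mem_append, List.mem_map] at hs
    rcases hs with hs | ⟨t, ht, rfl⟩
    · exact ih hps' s hs
    · have := ih hps' t ht
      omega

theorem pvSums_mem : ∀ (m : Nat) (rem : Int), rem.toNat ≤ m →
    ∀ s : Int, s ∈ pvSums (pvParts rem) ↔ (s = 0 ∨ (1 ≤ s ∧ s ≤ rem)) := by
  intro m
  induction m with
  | zero =>
    intro rem hrem s
    rw [pvParts, if_neg (by omega : ¬ 0 < rem)]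
    simp [pvSums]
    omega
  | succ m ih =>
    intro rem hrem s
    by_cases hpos : 0 < rem
    · have hb := pvHalf_bounds hpos
      rw [pvParts_eq_pos hpos]
      have hrec := ih (rem - PySem.Int.floordiv (rem + 1) 2) (by omega)
      simp only [pvSums, List.mem_append, List.mem_map]
      constructor
      · rintro (hs | ⟨t, ht, rfl⟩)
        · rcases (hrec s).1 hs with rfl | hbnd
          · exact Or.inl rfl
          · exact Or.inr ⟨hbnd.1, by omega⟩
        · rcases (hrec t).1 ht with rfl | hbnd
          · exact Or.inr ⟨by omega, by omega⟩
          · exact Or.inr ⟨by omega, by omega⟩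
      · rintro (rfl | hbnd)
        · exact Or.inl ((hrec 0).2 (Or.inl rfl))
        · by_cases hsmall : s ≤ rem - PySem.Int.floordiv (rem + 1) 2
          · exact Or.inl ((hrec s).2 (Or.inr ⟨hbnd.1, hsmall⟩))
          · exact Or.inr ⟨s - PySem.Int.floordiv (rem + 1) 2,
              (hrec (s - PySem.Int.floordiv (rem + 1) 2)).2 (by omega), by omega⟩
    · rw [pvParts, if_neg hpos]
      simp [pvSums]
      omega

-- ---- the meaning of B's whole per-denomination phase ----

theorem pvTheta_eq (n d : Int) (hd : 1 ≤ d) (hn : 0 ≤ n) :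
    ∀ (ps : List Int) (g : Int → Option Int), (∀ i : Int, i < 0 → g i = none) →
      (∀ q ∈ ps, 1 ≤ q) → ∀ j : Int,
      pvTheta n d ps g j =
        if 0 ≤ j ∧ j ≤ n then
          pvRunMin none (pvSums ps) (fun s => pvOadd (g (j - s * d)) s)
        else g j := by
  intro ps
  induction ps with
  | nil =>
    intro g hg _ j
    by_cases hj : 0 ≤ j ∧ j ≤ n
    · simp [pvTheta, pvSums, pvRunMin_cons, pvRunMin_nil, pvOmin_none_left, pvOadd_zero, hj]
    · simp [pvTheta, hj]
  | cons q ps ih =>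
    intro g hg hps j
    have hq := hps q List.mem_cons_self
    have hps' := fun x hx => hps x (List.mem_cons_of_mem _ hx)
    have hg' : ∀ i : Int, i < 0 → pvPsi n (q * d) q g i = none := by
      intro i hi
      unfold pvPsi
      rw [if_neg (by omega), hg i hi]
    have hstep : pvTheta n d (q :: ps) g j = pvTheta n d ps (pvPsi n (q * d) q g) j := rfl
    rw [hstep, ih (pvPsi n (q * d) q g) hg' hps' j]
    by_cases hj : 0 ≤ j ∧ j ≤ n
    · rw [if_pos hj, if_pos hj]
      have hqd0 : 1 ≤ q * d := le_trans hq (le_mul_of_one_le_right (by omega) hd)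
      have hterm : ∀ s ∈ pvSums ps,
          pvOadd (pvPsi n (q * d) q g (j - s * d)) s =
            pvOmin (pvOadd (g (j - s * d)) s) (pvOadd (g (j - (s + q) * d)) (s + q)) := by
        intro s hs
        have hs0 : 0 ≤ s := pvSums_nonneg hps' s hs
        have hsd : 0 ≤ s * d := mul_nonneg hs0 (by omega)
        have hsub : j - s * d - q * d = j - (s + q) * d := by ring
        by_cases hin : 0 ≤ j - s * d
        · unfold pvPsi
          rw [if_pos (by constructor <;> omega)]
          rw [pvOadd_omin, hsub, pvOadd_add, add_comm q s]
        · unfold pvPsi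
          rw [if_neg (by omega)]
          have h1 : g (j - s * d) = none := hg _ (by omega)
          have h2 : g (j - (s + q) * d) = none := hg _ (by rw [← hsub]; omega)
          rw [h1, h2, pvOadd_none, pvOadd_none, pvOmin_none_left]
      have hcong2 := pvRunMin_congr (i := (none : Option Int)) hterm
      rw [hcong2, pvRunMin_distrib]
      have hmap : pvRunMin none ((pvSums ps).map (· + q)) (fun s => pvOadd (g (j - s * d)) s)
          = pvRunMin none (pvSums ps) (fun s => pvOadd (g (j - (s + q) * d)) (s + q)) := by
        rw [pvRunMin_map]
      rw [show pvSums (q :: ps) = pvSums ps ++ (pvSums ps).map (· + q) from rfl,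
        pvRunMin_append, hmap]
    · rw [if_neg hj, if_neg hj]
      unfold pvPsi
      rw [if_neg hj]

-- ---- per-denomination equality of A's pass and B's split phase ----

theorem pvDenomStep (n c d : Int) (hd : 1 ≤ d) (hn : 0 ≤ n)
    (dpA dpB : List (Option Int))
    (hlenA : dpA.length = n.toNat + 1) (hlenB : dpB.length = n.toNat + 1)
    (hAB : ∀ i : Int, pvGet dpA i = pvGet dpB i) :
    (pvPassA n c d dpA).length = n.toNat + 1 ∧
    (pvSplitB n d (min c (PySem.Int.floordiv n d)) dpB).length = n.toNat + 1 ∧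
    ∀ i : Int, pvGet (pvPassA n c d dpA) i =
      pvGet (pvSplitB n d (min c (PySem.Int.floordiv n d)) dpB) i := by
  set cap := min c (PySem.Int.floordiv n d) with hcap
  have hA := pvPassA_get n c d hd hn dpA hlenA
  have hB := pvSplitB_get n d hd hn cap.toNat cap (le_refl _) dpB hlenB
  refine ⟨by rw [hA.1, hlenA], by rw [hB.1, hlenB], fun i => ?_⟩
  rw [hA.2 i, hB.2 i]
  have hfun : pvGet dpA = pvGet dpB := funext hAB
  rw [show pvPhi n c d (pvGet dpA) i = pvPhi n c d (pvGet dpB) i from by rw [hfun]]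
  have hgneg : ∀ i : Int, i < 0 → pvGet dpB i = none := fun i hi => pvGet_neg hi
  rw [pvTheta_eq n d hd hn (pvParts cap) (pvGet dpB) hgneg
    (pvParts_pos cap.toNat cap (le_refl _))]
  unfold pvPhi
  by_cases hj : 0 ≤ i ∧ i ≤ n
  · simp only [hj, if_pos]
    set g := pvGet dpB with hg
    set f := fun k : Int => pvOadd (g (i - k * d)) k with hf
    set K := min c (PySem.Int.floordiv i d) with hK
    have hstart : pvRunMin (g i) (PySem.List.pyRange 1 (K + 1) 1) f
        = pvRunMin none ((0 : Int) :: PySem.List.pyRange 1 (K + 1) 1) f := by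
      rw [pvRunMin_cons, pvOmin_none_left]
      have : f 0 = g i := by
        rw [hf]; simp [pvOadd_zero]
      rw [this]
    rw [hstart]
    have hKcap : K ≤ cap := by
      rw [hK, hcap]
      have hmono : PySem.Int.floordiv i d ≤ PySem.Int.floordiv n d := by
        rw [PySem.Int.floordiv_eq_ediv_of_pos (by omega : (0:Int) < d),
          PySem.Int.floordiv_eq_ediv_of_pos (by omega : (0:Int) < d)]
        exact Int.ediv_le_ediv (by omega) hj.2
      omega
    apply pvRunMin_eq_of
    · intro x hx
      rcases List.mem_cons.1 hx with rfl | hx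
      · exact (pvSums_mem cap.toNat cap (le_refl _) 0).2 (Or.inl rfl)
      · have hmem := (PySem.List.mem_pyRange_one).1 hx
        exact (pvSums_mem cap.toNat cap (le_refl _) x).2 (Or.inr ⟨hmem.1, by omega⟩)
    · intro x hx
      rcases (pvSums_mem cap.toNat cap (le_refl _) x).1 hx with rfl | hb
      · exact Or.inl List.mem_cons_self
      · by_cases hxK : x ≤ K
        · have hxmem : x ∈ PySem.List.pyRange 1 (K + 1) 1 :=
            (PySem.List.mem_pyRange_one).2 ⟨hb.1, by omega⟩
          exact Or.inl (List.mem_cons_of_mem _ hxmem)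
        · right
          have hxc : x ≤ c := by rw [hcap] at hb; omega
          have hxfd : PySem.Int.floordiv i d < x := by rw [hK] at hxK; omega
          have hxd : i < x * d := by
            by_contra hcon
            push_neg at hcon
            have := (PySem.Int.le_floordiv_iff_mul_le (by omega : (0:Int) < d)).2 hcon
            omega
          have hnone : g (i - x * d) = none := pvGet_neg (by omega)
          show pvOadd (g (i - x * d)) x = none
          rw [hnone, pvOadd_none]
  · simp only [hj, if_neg, not_false_iff]

-- ===== VERDICT (by name: the statement is the Claim_ definition above) =====
theorem calculate_min_chips_with_limits_spec : Claim_equal_calculate_min_chips_with_limits := by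
  intro M limits _ hpre
  unfold Spec_calculate_min_chips_with_limits
  unfold calculate_min_chips_with_limits calculate_min_chips_with_limits_alt
  by_cases hmod : PySem.Int.mod M 10 ≠ 0
  · rw [if_pos hmod, if_pos hmod]
  · rw [if_neg hmod, if_neg hmod]
    have hmod' : M % 10 = 0 := by
      rw [← PySem.Int.mod_eq_emod_of_pos (by omega : (0:Int) < 10)]
      omega
    have hpre' : 0 ≤ M ∧ 5 ≤ limits.length := by
      rcases hpre with h | h
      · exact absurd hmod' h
      · exact h
    obtain ⟨hM, hlenlim⟩ := hpre'
    set target := PySem.Int.floordiv M 10 with htarget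
    have htpos : 0 ≤ target := by
      rw [htarget, PySem.Int.floordiv_eq_ediv_of_pos (by omega : (0:Int) < 10)]
      exact Int.ediv_nonneg hM (by omega)
    -- destructure the first five limits
    obtain ⟨l0, l1, l2, l3, l4, rest, rfl⟩ :
        ∃ l0 l1 l2 l3 l4 rest, limits = l0 :: l1 :: l2 :: l3 :: l4 :: rest := by
      match limits, hlenlim with
      | l0 :: l1 :: l2 :: l3 :: l4 :: rest, _ => exact ⟨l0, l1, l2, l3, l4, rest, rfl⟩
    set dp0 := (List.replicate (target.toNat + 1) (none : Option Int)).set 0 (some 0) with hdp0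
    have hlen0 : dp0.length = target.toNat + 1 := by simp [hdp0]
    have hrangeA : PySem.List.pyRange 0 5 1 = [0, 1, 2, 3, 4] := by decide
    have hzipB : ([(1:Int), 5, 10, 50, 100]).zip (l0 :: l1 :: l2 :: l3 :: l4 :: rest)
        = [(1, l0), (5, l1), (10, l2), (50, l3), (100, l4)] := rfl
    rw [hrangeA, hzipB]
    simp only [List.foldl_cons, List.foldl_nil]
    have hgetlim : ∀ (i : Nat) (h : i < 5),
        PySem.List.pyGetD (l0 :: l1 :: l2 :: l3 :: l4 :: rest) (i : Int) 0 =
          [l0, l1, l2, l3, l4].getD i 0 := by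
      intro i h
      rw [PySem.List.pyGetD_natCast]
      interval_cases i <;> rfl
    have hget0 : PySem.List.pyGetD (l0 :: l1 :: l2 :: l3 :: l4 :: rest) (0 : Int) 0 = l0 := hgetlim 0 (by omega)
    have hget1 : PySem.List.pyGetD (l0 :: l1 :: l2 :: l3 :: l4 :: rest) (1 : Int) 0 = l1 := hgetlim 1 (by omega)
    have hget2 : PySem.List.pyGetD (l0 :: l1 :: l2 :: l3 :: l4 :: rest) (2 : Int) 0 = l2 := hgetlim 2 (by omega)
    have hget3 : PySem.List.pyGetD (l0 :: l1 :: l2 :: l3 :: l4 :: rest) (3 : Int) 0 = l3 := hgetlim 3 (by omega)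
    have hget4 : PySem.List.pyGetD (l0 :: l1 :: l2 :: l3 :: l4 :: rest) (4 : Int) 0 = l4 := hgetlim 4 (by omega)
    have hd0 : PySem.List.pyGetD pvDenomsA (0 : Int) 0 = 1 := by decide
    have hd1 : PySem.List.pyGetD pvDenomsA (1 : Int) 0 = 5 := by decide
    have hd2 : PySem.List.pyGetD pvDenomsA (2 : Int) 0 = 10 := by decide
    have hd3 : PySem.List.pyGetD pvDenomsA (3 : Int) 0 = 50 := by decide
    have hd4 : PySem.List.pyGetD pvDenomsA (4 : Int) 0 = 100 := by decide
    rw [hget0, hget1, hget2, hget3, hget4, hd0, hd1, hd2, hd3, hd4]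
    -- chain the five denominations
    have h1 := pvDenomStep target l0 1 (by omega) htpos dp0 dp0 hlen0 hlen0 (fun i => rfl)
    set a1 := pvPassA target l0 1 dp0
    set b1 := pvSplitB target 1 (min l0 (PySem.Int.floordiv target 1)) dp0
    have h2 := pvDenomStep target l1 5 (by omega) htpos a1 b1 h1.1 h1.2.1 h1.2.2
    set a2 := pvPassA target l1 5 a1
    set b2 := pvSplitB target 5 (min l1 (PySem.Int.floordiv target 5)) b1
    have h3 := pvDenomStep target l2 10 (by omega) htpos a2 b2 h2.1 h2.2.1 h2.2.2
    set a3 := pvPassA target l2 10 a2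
    set b3 := pvSplitB target 10 (min l2 (PySem.Int.floordiv target 10)) b2
    have h4 := pvDenomStep target l3 50 (by omega) htpos a3 b3 h3.1 h3.2.1 h3.2.2
    set a4 := pvPassA target l3 50 a3
    set b4 := pvSplitB target 50 (min l3 (PySem.Int.floordiv target 50)) b3
    have h5 := pvDenomStep target l4 100 (by omega) htpos a4 b4 h4.1 h4.2.1 h4.2.2
    set a5 := pvPassA target l4 100 a4
    set b5 := pvSplitB target 100 (min l4 (PySem.Int.floordiv target 100)) b4
    have hfinal : PySem.List.pyGetD a5 target none = PySem.List.pyGetD b5 target none := by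
      rw [PySem.List.pyGetD_of_nonneg a5 none htpos, PySem.List.pyGetD_of_nonneg b5 none htpos]
      have hA := h5.2.2 target
      rw [pvGet, if_pos htpos, pvGet, if_pos htpos] at hA
      exact hA
    rw [hfinal]
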